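-- pv_equiv track=rewrite | github.com/kengjichow/boolean_retrieval | index.py | insert_skip_pointers
-- ===== SOURCE A (Python) =====
-- import math
--
-- def insert_skip_pointers(postings):
--     '''
--     Inserts skip pointers in the form of indices into a postings list with a skip distance
--     of the root of the length of the list. Skip pointers are only inserted if the skip distance
--     exceeds 2.
--     :param postings: a list of postings as integers.
--     :return: a list of postings as strings, including skip pointers.
--     '''
--     length = len(postings)
--     skip_distance = int(math.sqrt(length))
--     if skip_distance <= 2:
--         return ",".join(postings)
--     string = ""
--     count = 0
--     for posting in postings:
--         string += posting
--         if count % skip_distance == 0: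
--             skip_pointer = count + skip_distance
--             if skip_pointer < length:
--                 string += "/" + str(skip_pointer)
--         string += ","
--         count += 1
--     return string[:-1]
-- ===== SOURCE B (Python) =====
-- import math
--
-- def insert_skip_pointers(postings):
--     length = len(postings)
--     skip_distance = int(math.sqrt(length))
--     if skip_distance <= 2:
--         return ",".join(postings)
--     result = list(postings)
--     for i in range(0, length, skip_distance):
--         if i + skip_distance < length:
--             result[i] = result[i] + "/" + str(i + skip_distance)
--     return ",".join(result)
-- ===== Notes on version B (the rewrite author's own statement) =====
-- stated objective: faster
-- what changed: B copies the list, updates only the ~sqrt(n) skip positions via a strided range, and joins once, instead of A's per-element modulo test with string += accumulation and a trailing-comma slice.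
import Mathlib
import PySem

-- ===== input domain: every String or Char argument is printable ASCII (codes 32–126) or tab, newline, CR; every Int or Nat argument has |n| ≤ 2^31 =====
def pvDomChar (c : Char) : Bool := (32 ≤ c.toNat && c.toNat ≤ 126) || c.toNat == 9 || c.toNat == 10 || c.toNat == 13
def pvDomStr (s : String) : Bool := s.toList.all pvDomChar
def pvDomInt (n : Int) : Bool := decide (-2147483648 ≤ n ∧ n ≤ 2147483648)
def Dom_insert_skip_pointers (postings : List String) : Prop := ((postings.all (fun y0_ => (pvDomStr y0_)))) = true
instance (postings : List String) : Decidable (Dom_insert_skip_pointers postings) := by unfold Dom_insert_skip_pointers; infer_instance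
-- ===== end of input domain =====

-- B replaces A's per-element modulo scan and string accumulation by a strided pass over a copy of the list that touches only the skip positions, then one join; neither version mutates its argument.

-- ===== PORT A =====
def insert_skip_pointers (postings : List String) : String :=
  let length := postings.length
  let skip_distance := Nat.sqrt length
  if skip_distance ≤ 2 then
    PySem.Str.join "," postings
  else
    let res := postings.foldl
      (fun (acc : List Char × Nat) posting =>
        let string := acc.1 ++ posting.toList
        let string :=
          if acc.2 % skip_distance = 0 then
            let skip_pointer := acc.2 + skip_distance
            if skip_pointer < length then
              string ++ ('/' :: PySem.Int.toChars (skip_pointer : Int))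
            else string
          else string
        (string ++ [','], acc.2 + 1))
      (([] : List Char), 0)
    String.ofList (PySem.List.slice res.1 none (some (-1)))

-- ===== PORT B =====
def insert_skip_pointers_alt (postings : List String) : String :=
  let length := postings.length
  let skip_distance := Nat.sqrt length
  if skip_distance ≤ 2 then
    PySem.Str.join "," postings
  else
    let result := postings
    let result := (PySem.List.pyRange 0 (length : Int) (skip_distance : Int)).foldl
      (fun (result : List String) i =>
        if i + (skip_distance : Int) < (length : Int) then
          result.set i.toNat
            (PySem.List.pyGetD result i "" ++ "/" ++ PySem.Int.toStr (i + (skip_distance : Int)))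
        else result)
      result
    PySem.Str.join "," result

-- ===== PRECONDITION & SPEC =====
def Spec_insert_skip_pointers (postings : List String) (out : String) : Prop := out = insert_skip_pointers_alt postings
instance (postings : List String) (out : String) : Decidable (Spec_insert_skip_pointers postings out) := by unfold Spec_insert_skip_pointers; infer_instance

-- ===== CLAIM (what is proved, stated in full; the proofs are below) =====
def Claim_equal_insert_skip_pointers : Prop := ∀ (postings : List String), Dom_insert_skip_pointers postings → Spec_insert_skip_pointers postings (insert_skip_pointers postings)

-- ===== LEMMAS AND PROOFS =====

-- the decorated posting both programs produce at index i (n = list length, sd = skip distance)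
def pvDec (sd n : Nat) (i : Nat) (p : String) : String :=
  if i % sd = 0 ∧ i + sd < n then p ++ "/" ++ PySem.Int.toStr ((i + sd : Nat) : Int) else p

-- the chunk A appends for the posting at index i, comma included
def pvBody (sd n : Nat) (i : Nat) (p : String) : List Char :=
  (pvDec sd n i p).toList ++ [',']

-- A's loop emits one comma-terminated chunk per posting
theorem pvA_fold (sd n : Nat) :
    ∀ (ps : List String) (acc : List Char) (c : Nat),
      ps.foldl
        (fun (a : List Char × Nat) posting =>
          let string := a.1 ++ posting.toList
          let string :=
            if a.2 % sd = 0 then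
              let skip_pointer := a.2 + sd
              if skip_pointer < n then
                string ++ ('/' :: PySem.Int.toChars (skip_pointer : Int))
              else string
            else string
          (string ++ [','], a.2 + 1)) (acc, c)
      = (acc ++ (ps.mapIdx (fun k p => pvBody sd n (c + k) p)).flatten, c + ps.length) := by
  intro ps
  induction ps with
  | nil => intro acc c; simp
  | cons p t ih =>
    intro acc c
    rw [List.foldl_cons, ih]
    have h3 : ∀ k, c + 1 + k = c + (k + 1) := fun k => by omega
    simp only [List.mapIdx_cons, List.flatten_cons, pvBody, pvDec, Prod.mk.injEq,
      List.length_cons, h3, Nat.add_zero]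
    by_cases h1 : c % sd = 0 <;> by_cases h2 : c + sd < n <;>
      simp [h1, h2, String.toList_append, PySem.Int.toList_toStr]

-- one List.set written as a mapIdx
theorem pv_set_mapIdx (res : List String) (h : Nat) (v : String → String) (hh : h < res.length) :
    res.set h (v (res.getD h "")) = res.mapIdx (fun i p => if i = h then v p else p) := by
  apply List.ext_getElem
  · simp
  · intro i hi hi2
    rw [List.getElem_set, List.getElem_mapIdx]
    by_cases hih : i = h
    · subst hih; simp [List.getElem?_eq_getElem hh]
    · simp [hih, Ne.symm hih]

-- a fold of guarded in-place updates at distinct in-range positions is a single mapIdx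
theorem pvB_fold (g : Nat → String → String) (C : Nat → Prop) [DecidablePred C] :
    ∀ (L : List Nat) (res : List String), L.Nodup → (∀ i ∈ L, i < res.length) →
      L.foldl (fun r i => if C i then r.set i (g i (r.getD i "")) else r) res
      = res.mapIdx (fun i p => if i ∈ L ∧ C i then g i p else p) := by
  intro L
  induction L with
  | nil =>
    intro res _ _
    apply List.ext_getElem (by simp)
    intro i h1 h2
    simp
  | cons h t ih =>
    intro res hnd hb
    have hnt := (List.nodup_cons.mp hnd).2
    have hht : h ∉ t := (List.nodup_cons.mp hnd).1
    rw [List.foldl_cons]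
    by_cases hc : C h
    · rw [if_pos hc, pv_set_mapIdx res h (g h) (hb h (by simp))]
      rw [ih _ hnt (by intro i hi; simpa using hb i (List.mem_cons_of_mem _ hi))]
      rw [List.mapIdx_mapIdx]
      congr 1
      funext i p
      simp only [Function.comp_apply]
      by_cases hit : i ∈ t
      · have hne : i ≠ h := fun e => hht (e ▸ hit)
        by_cases hci : C i <;> simp [hit, hci, hne]
      · by_cases hih : i = h
        · subst hih; simp [hit, hc]
        · simp [hit, hih]
    · rw [if_neg hc]
      rw [ih _ hnt (by intro i hi; exact hb i (List.mem_cons_of_mem _ hi))]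
      have hfun : (fun (i : Nat) (p : String) => if i ∈ t ∧ C i then g i p else p)
          = (fun (i : Nat) (p : String) => if i ∈ h :: t ∧ C i then g i p else p) := by
        funext i p
        by_cases hih : i = h
        · subst hih; simp [hht, hc]
        · simp [hih]
      rw [hfun]

theorem pv_mapIdx_congr {α β : Type} (l : List α) (f g : Nat → α → β)
    (h : ∀ (i : Nat) (hi : i < l.length), f i l[i] = g i l[i]) : l.mapIdx f = l.mapIdx g := by
  apply List.ext_getElem (by simp)
  intro i h1 h2
  simp only [List.getElem_mapIdx]
  exact h i (by simpa using h1)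

-- B's whole else-branch fold is the mapIdx decoration
theorem pvB_main (postings : List String) (hsd : ¬ Nat.sqrt postings.length ≤ 2) :
    (PySem.List.pyRange 0 (postings.length : Int) (Nat.sqrt postings.length : Int)).foldl
      (fun (result : List String) i =>
        if i + (Nat.sqrt postings.length : Int) < (postings.length : Int) then
          result.set i.toNat
            (PySem.List.pyGetD result i "" ++ "/" ++ PySem.Int.toStr (i + (Nat.sqrt postings.length : Int)))
        else result)
      postings
    = postings.mapIdx (pvDec (Nat.sqrt postings.length) postings.length) := by
  set n := postings.length with hn
  set sd := Nat.sqrt n with hsdd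
  have hsd3 : 3 ≤ sd := by omega
  have hn9 : 9 ≤ n := by
    have := (Nat.le_sqrt (m := 3) (n := n)).mp hsd3
    omega
  have hsdpos : (0 : Int) < (sd : Int) := by exact_mod_cast Nat.lt_of_lt_of_le (by norm_num) hsd3
  set M : Nat := (((n : Int) - 0 + sd - 1) / sd).toNat with hM
  have hMk : ∀ k : Nat, k < M ↔ sd * k < n := by
    intro k
    rw [hM, Int.lt_toNat]
    set t : Int := ((n : Int) - 0 + sd - 1) / sd with ht
    have hdm := Int.mul_ediv_add_emod ((n : Int) - 0 + sd - 1) sd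
    have hr0 : 0 ≤ ((n : Int) - 0 + sd - 1) % sd := Int.emod_nonneg _ (by omega)
    have hrlt : ((n : Int) - 0 + sd - 1) % sd < sd := Int.emod_lt_of_pos _ hsdpos
    constructor
    · intro hk
      have h1 : (k : Int) ≤ t - 1 := by omega
      have h2 : (sd : Int) * k ≤ (sd : Int) * (t - 1) :=
        mul_le_mul_of_nonneg_left h1 (by omega)
      have : (sd : Int) * k < n := by nlinarith [hdm, hr0, hrlt]
      exact_mod_cast this
    · intro hk
      have hk' : (sd : Int) * k < n := by exact_mod_cast hk
      have h2 : (sd : Int) * k < sd * t := by nlinarith [hdm, hr0, hrlt]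
      have := lt_of_mul_lt_mul_left h2 (by omega : (0:Int) ≤ sd)
      omega
  rw [PySem.List.pyRange_of_pos 0 (n : Int) hsdpos,
    if_pos (by exact_mod_cast Nat.lt_of_lt_of_le (by norm_num) hn9), List.foldl_map]
  have hstep : (fun (r : List String) (k : Nat) =>
        (fun (result : List String) (i : Int) =>
          if i + (sd : Int) < (n : Int) then
            result.set i.toNat
              (PySem.List.pyGetD result i "" ++ "/" ++ PySem.Int.toStr (i + (sd : Int)))
          else result) r ((0 : Int) + (sd : Int) * k))
      = (fun (r : List String) (k : Nat) =>
          (fun (r : List String) (j : Nat) =>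
            if j + sd < n then
              r.set j ((r.getD j "") ++ "/" ++ PySem.Int.toStr ((j + sd : Nat) : Int))
            else r) r (sd * k)) := by
    funext r k
    have h0 : ((0 : Int) + (sd : Int) * k) = ((sd * k : Nat) : Int) := by push_cast; ring
    rw [h0]
    beta_reduce
    by_cases hc : sd * k + sd < n
    · rw [if_pos (by exact_mod_cast hc), if_pos hc]
      rw [PySem.List.pyGetD_of_nonneg _ _ (by positivity)]
      norm_num
      norm_cast
    · rw [if_neg (by exact_mod_cast hc), if_neg hc]
  rw [hstep]
  have hback := List.foldl_map (f := fun (k : Nat) => sd * k)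
    (g := fun (r : List String) (j : Nat) =>
      if j + sd < n then r.set j ((r.getD j "") ++ "/" ++ PySem.Int.toStr ((j + sd : Nat) : Int)) else r)
    (l := List.range M) (init := postings)
  rw [← hback]
  rw [pvB_fold (fun i p => p ++ "/" ++ PySem.Int.toStr ((i + sd : Nat) : Int)) (fun j => j + sd < n) _ _
      (List.Nodup.map (fun a b hab => by
        exact Nat.eq_of_mul_eq_mul_left (by omega) hab) (List.nodup_range))
      (by
        intro i hi
        obtain ⟨k, hk, rfl⟩ := List.mem_map.mp hi
        rw [List.mem_range] at hk
        exact (hMk k).mp hk)]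
  apply pv_mapIdx_congr
  intro i hi
  have hmem : i ∈ List.map (fun k => sd * k) (List.range M) ↔ i % sd = 0 ∧ i < n := by
    constructor
    · intro h
      obtain ⟨k, hk, rfl⟩ := List.mem_map.mp h
      rw [List.mem_range] at hk
      exact ⟨Nat.mul_mod_right _ _, (hMk k).mp hk⟩
    · rintro ⟨hmod, hlt⟩
      obtain ⟨k, rfl⟩ := Nat.dvd_iff_mod_eq_zero.mpr hmod
      exact List.mem_map.mpr ⟨k, List.mem_range.mpr ((hMk k).mpr hlt), rfl⟩
  have hiff : (i ∈ List.map (fun k => sd * k) (List.range M) ∧ i + sd < n)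
      ↔ (i % sd = 0 ∧ i + sd < n) := by
    constructor
    · rintro ⟨h1, h2⟩; exact ⟨(hmem.mp h1).1, h2⟩
    · rintro ⟨h1, h2⟩; exact ⟨hmem.mpr ⟨h1, by omega⟩, h2⟩
  unfold pvDec
  simp only [hiff]

-- joining with "," is A's comma-chunk concatenation minus the trailing comma
theorem pv_flatten_chunks : ∀ (l : List (List Char)), l ≠ [] →
    (l.map (· ++ [','])).flatten = PySem.Chars.join [','] l ++ [','] := by
  intro l
  induction l with
  | nil => intro h; exact absurd rfl h
  | cons x t ih =>
    intro _
    cases t with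
    | nil => simp [PySem.Chars.join_singleton]
    | cons y u =>
      rw [List.map_cons, List.flatten_cons, ih (by simp), PySem.Chars.join_cons_cons]
      simp [List.append_assoc]

theorem pv_join_chunks (l : List (List Char)) (h : l ≠ []) :
    PySem.Chars.join [','] l = ((l.map (· ++ [','])).flatten).dropLast := by
  rw [pv_flatten_chunks l h]
  simp

theorem pv_map_mapIdx {α β γ : Type} (l : List α) (f : Nat → α → β) (g : β → γ) :
    (l.mapIdx f).map g = l.mapIdx (fun i a => g (f i a)) := by
  apply List.ext_getElem (by simp)
  intro i h1 h2
  simp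

theorem insert_skip_pointers_eq_alt (postings : List String) :
    insert_skip_pointers postings = insert_skip_pointers_alt postings := by
  by_cases hsd : Nat.sqrt postings.length ≤ 2
  · simp only [insert_skip_pointers, insert_skip_pointers_alt, if_pos hsd]
  · have hn9 : 9 ≤ postings.length := by
      have h3 : 3 ≤ Nat.sqrt postings.length := by omega
      have := (Nat.le_sqrt (m := 3) (n := postings.length)).mp h3
      omega
    have hne : postings ≠ [] := by
      intro h; rw [h] at hn9; simp at hn9
    simp only [insert_skip_pointers, insert_skip_pointers_alt, if_neg hsd]
    rw [pvA_fold (Nat.sqrt postings.length) postings.length postings [] 0]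
    rw [pvB_main postings hsd]
    apply String.toList_inj.mp
    rw [String.toList_ofList, PySem.Str.toList_join]
    rw [PySem.List.slice_to_neg_one]
    have hcomma : (",".toList) = [','] := rfl
    rw [hcomma]
    rw [pv_map_mapIdx postings (pvDec (Nat.sqrt postings.length) postings.length) String.toList]
    rw [pv_join_chunks _ (by simpa using hne)]
    rw [pv_map_mapIdx]
    simp only [List.nil_append, Nat.zero_add, pvBody]

-- ===== VERDICT (by name: the statement is the Claim_ definition above) =====
theorem insert_skip_pointers_spec : Claim_equal_insert_skip_pointers := by
  intro postings _
  exact insert_skip_pointers_eq_alt postings
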